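-- pv_equiv track=rewrite | github.com/yeojingi/coding_test | bj/Quadtree_1992.py | zeroOrOne
-- ===== SOURCE A (Python) =====
-- def zeroOrOne(rows):
--   allZero = 1
--   allOne = 1
--   for row in rows:
--     if row.count(0) != len(row):
--       allZero = 0
--     if row.count(1) != len(row):
--       allOne = 0
--     if allZero == 0 and allOne == 0:
--       return -1
--
--   if allZero == 1:
--     return 0
--   elif allOne == 1:
--     return 1
--   return -1
-- ===== SOURCE B (Python) =====
-- def zeroOrOne(rows):
--     vals = set()
--     for row in rows:
--         vals.update(row)
--     if vals <= {0}:
--         return 0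
--     if vals <= {1}:
--         return 1
--     return -1
-- ===== Notes on version B (the rewrite author's own statement) =====
-- stated objective: simpler
-- what changed: Replaces the per-row count(0)/count(1) flag bookkeeping with early return by one distinct-value set accumulated over all rows and two subset tests against {0} and {1}.
import Mathlib
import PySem

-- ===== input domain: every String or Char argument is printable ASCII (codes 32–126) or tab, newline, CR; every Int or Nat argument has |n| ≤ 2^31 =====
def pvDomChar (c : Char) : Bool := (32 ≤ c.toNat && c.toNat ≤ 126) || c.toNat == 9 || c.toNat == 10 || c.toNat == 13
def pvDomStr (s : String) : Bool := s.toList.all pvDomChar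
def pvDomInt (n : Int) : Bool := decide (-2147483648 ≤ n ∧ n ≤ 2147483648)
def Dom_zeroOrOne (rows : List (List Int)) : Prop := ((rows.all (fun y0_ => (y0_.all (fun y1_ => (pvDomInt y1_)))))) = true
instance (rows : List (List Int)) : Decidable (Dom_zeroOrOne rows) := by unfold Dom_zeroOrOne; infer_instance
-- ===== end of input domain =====

-- B replaces A's per-row count flags and early return by one distinct-value set over all cells plus two subset tests (objective: simpler).


-- ===== PORT A =====
-- the for-loop over rows, carrying the two flags; the 'if ... return -1' is the first branch
def zeroOrOneAux : List (List Int) → Int → Int → Int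
  | [], allZero, allOne =>
      if allZero = 1 then 0 else if allOne = 1 then 1 else -1
  | row :: rs, allZero, allOne =>
      let allZero' := if PySem.List.count row 0 ≠ row.length then 0 else allZero
      let allOne'  := if PySem.List.count row 1 ≠ row.length then 0 else allOne
      if allZero' = 0 ∧ allOne' = 0 then -1 else zeroOrOneAux rs allZero' allOne'

def zeroOrOne (rows : List (List Int)) : Int := zeroOrOneAux rows 1 1

-- ===== PORT B =====
-- Source B: accumulate vals = set of all distinct cell values, then two subset tests
def zeroOrOne_alt (rows : List (List Int)) : Int :=
  let vals := rows.foldl (fun s row => PySem.Set.update s row) PySem.Set.empty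
  if PySem.Set.issubset vals (PySem.Set.ofList [(0 : Int)]) then 0
  else if PySem.Set.issubset vals (PySem.Set.ofList [(1 : Int)]) then 1
  else -1

-- ===== PRECONDITION & SPEC =====
def Spec_zeroOrOne (rows : List (List Int)) (out : Int) : Prop := out = zeroOrOne_alt rows
instance (rows : List (List Int)) (out : Int) : Decidable (Spec_zeroOrOne rows out) := by unfold Spec_zeroOrOne; infer_instance

-- ===== CLAIM (what is proved, stated in full; the proofs are below) =====
def Claim_equal_zeroOrOne : Prop := ∀ (rows : List (List Int)), Dom_zeroOrOne rows → Spec_zeroOrOne rows (zeroOrOne rows)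

-- ===== LEMMAS AND PROOFS =====

-- row.count(v) == len(row) iff every cell of the row equals v
theorem count_eq_length_iff (row : List Int) (v : Int) :
    PySem.List.count row v = row.length ↔ ∀ x ∈ row, x = v := by
  simp [PySem.List.count, List.count_eq_length, eq_comm]

-- characterisation of A's loop, for arbitrary flag values
theorem zeroOrOneAux_eq (rows : List (List Int)) : ∀ (aZ aO : Int),
    zeroOrOneAux rows aZ aO =
      if aZ = 1 ∧ ∀ r ∈ rows, ∀ x ∈ r, x = 0 then 0
      else if aO = 1 ∧ ∀ r ∈ rows, ∀ x ∈ r, x = 1 then 1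
      else -1 := by
  induction rows with
  | nil => intro aZ aO; simp [zeroOrOneAux]
  | cons row rs ih =>
      intro aZ aO
      simp only [zeroOrOneAux, List.forall_mem_cons]
      rw [ih]
      simp only [← count_eq_length_iff]
      by_cases h0 : PySem.List.count row 0 = row.length <;>
      by_cases h1 : PySem.List.count row 1 = row.length <;>
        simp only [h0, h1, ne_eq, not_true_eq_false, not_false_eq_true, true_and, false_and,
          and_true, and_false, if_neg, if_pos] <;>
        split_ifs <;> first | rfl | omega

-- membership in the accumulated set = membership in some row
theorem mem_vals (rows : List (List Int)) (s : PySem.Set Int) (x : Int) :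
    x ∈ rows.foldl (fun s row => PySem.Set.update s row) s ↔ x ∈ s ∨ ∃ r ∈ rows, x ∈ r := by
  induction rows generalizing s with
  | nil => simp
  | cons row rs ih =>
      simp only [List.foldl_cons, ih, PySem.Set.mem_update, List.exists_mem_cons_iff]
      tauto

-- characterisation of B
theorem alt_eq (rows : List (List Int)) :
    zeroOrOne_alt rows =
      if ∀ r ∈ rows, ∀ x ∈ r, x = 0 then 0
      else if ∀ r ∈ rows, ∀ x ∈ r, x = 1 then 1
      else -1 := by
  have hsub : ∀ v : Int,
      PySem.Set.issubset (rows.foldl (fun s row => PySem.Set.update s row) PySem.Set.empty)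
        (PySem.Set.ofList [v]) = true ↔ ∀ r ∈ rows, ∀ x ∈ r, x = v := by
    intro v
    rw [PySem.Set.issubset_iff]
    constructor
    · intro h r hr x hx
      have := h x ((mem_vals rows _ x).2 (Or.inr ⟨r, hr, hx⟩))
      simpa [PySem.Set.mem_ofList] using this
    · intro h x hx
      rcases (mem_vals rows _ x).1 hx with h' | ⟨r, hr, hxr⟩
      · simp [PySem.Set.empty] at h'
      · simp [PySem.Set.mem_ofList, h r hr x hxr]
  simp only [zeroOrOne_alt]
  by_cases c0 : ∀ r ∈ rows, ∀ x ∈ r, x = 0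
  · rw [if_pos ((hsub 0).mpr c0), if_pos c0]
  · rw [if_neg (fun h => c0 ((hsub 0).mp h)), if_neg c0]
    by_cases c1 : ∀ r ∈ rows, ∀ x ∈ r, x = 1
    · rw [if_pos ((hsub 1).mpr c1), if_pos c1]
    · rw [if_neg (fun h => c1 ((hsub 1).mp h)), if_neg c1]

-- ===== VERDICT (by name: the statement is the Claim_ definition above) =====
theorem zeroOrOne_spec : Claim_equal_zeroOrOne := by
  intro rows _
  show zeroOrOne rows = zeroOrOne_alt rows
  rw [zeroOrOne, zeroOrOneAux_eq, alt_eq]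
  simp
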